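-- pv_equiv track=rewrite | github.com/mmi-ing/Algorithm_Programmers | Hacker_Rank/no2.py | numDuplicates
-- ===== SOURCE A (Python) =====
-- def numDuplicates(name, price, weight):
--     product_dict = {}
--     duplicates = 0
--
--     for i in range(len(name)):
--         product_id = (name[i], price[i], weight[i])
--
--         #중복 확인
--         if product_id in product_dict:
--             duplicates += 1
--         else:
--             product_dict[product_id] = 1
--
--     return duplicates
-- ===== SOURCE B (Python) =====
-- def numDuplicates(name, price, weight):
--     ids = sorted([(name[i], price[i], weight[i]) for i in range(len(name))])
--     return sum(1 for u, v in zip(ids, ids[1:]) if u == v)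
-- ===== Notes on version B (the rewrite author's own statement) =====
-- stated objective: alternative
-- what changed: Replaces A's hash-dict seen-set membership loop by sorting the id tuples and counting adjacent equal neighbours in the sorted list (no dictionary or membership test at all).
import Mathlib
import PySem

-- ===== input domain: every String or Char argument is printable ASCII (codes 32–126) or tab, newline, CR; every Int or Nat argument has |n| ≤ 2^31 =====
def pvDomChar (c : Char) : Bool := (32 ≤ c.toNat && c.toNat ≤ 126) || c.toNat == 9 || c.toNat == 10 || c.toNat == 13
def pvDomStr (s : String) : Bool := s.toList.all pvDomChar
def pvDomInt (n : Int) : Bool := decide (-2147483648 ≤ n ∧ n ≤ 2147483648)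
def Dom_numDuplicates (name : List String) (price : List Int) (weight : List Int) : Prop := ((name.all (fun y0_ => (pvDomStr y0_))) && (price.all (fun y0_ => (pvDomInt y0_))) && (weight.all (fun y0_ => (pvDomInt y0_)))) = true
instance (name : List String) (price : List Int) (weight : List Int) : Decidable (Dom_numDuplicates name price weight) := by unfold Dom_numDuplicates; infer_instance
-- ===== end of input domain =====

-- B sorts the product-id tuples and counts adjacent equal neighbours, replacing A's
-- hash-dict membership-and-increment loop; objective: alternative (no speed claim).


-- ===== PORT A =====
-- literal port: for i in range(len(name)): build product_id by indexing; if present count, else insert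
def numDuplicates (name : List String) (price : List Int) (weight : List Int) : Int :=
  (PySem.List.pyRange 0 (name.length : Int) 1).foldl
    (fun (st : PySem.Dict (String × Int × Int) Int × Int) i =>
      let pid := (PySem.List.pyGetD name i "", PySem.List.pyGetD price i 0, PySem.List.pyGetD weight i 0)
      if st.1.contains pid then (st.1, st.2 + 1) else (st.1.insert pid 1, st.2))
    (PySem.Dict.empty, 0) |>.2

-- ===== PORT B =====
-- Python compares (str, int, int) tuples lexicographically, strings by code point;
-- that order is exactly the Lex order on List Char ×ₗ (Int ×ₗ Int) through this key.
def pyTupleKey (x : String × Int × Int) : List Char ×ₗ (Int ×ₗ Int) :=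
  toLex (x.1.toList, toLex (x.2.1, x.2.2))

-- literal port of Source B: build ids by the same indexing, sort them, count adjacent equal pairs
def numDuplicates_alt (name : List String) (price : List Int) (weight : List Int) : Int :=
  let ids := (PySem.List.pyRange 0 (name.length : Int) 1).map
    (fun i => (PySem.List.pyGetD name i "", PySem.List.pyGetD price i 0, PySem.List.pyGetD weight i 0))
  let s := PySem.List.sorted ids pyTupleKey
  (s.zip (PySem.List.slice s (some 1) none)).foldl
    (fun c p => if p.1 == p.2 then c + 1 else c) 0

-- ===== PRECONDITION & SPEC =====
-- Pre_: price and weight must be at least as long as name, otherwise A (and B) raise IndexError.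
def Pre_numDuplicates (name : List String) (price : List Int) (weight : List Int) : Prop :=
  name.length ≤ price.length ∧ name.length ≤ weight.length
instance (name : List String) (price : List Int) (weight : List Int) : Decidable (Pre_numDuplicates name price weight) := by unfold Pre_numDuplicates; infer_instance
def pvWitness_numDuplicates : List String × List Int × List Int := (["a", "b", "a"], [1, 2, 1], [3, 4, 3])

def Spec_numDuplicates (name : List String) (price : List Int) (weight : List Int) (out : Int) : Prop := out = numDuplicates_alt name price weight
instance (name : List String) (price : List Int) (weight : List Int) (out : Int) : Decidable (Spec_numDuplicates name price weight out) := by unfold Spec_numDuplicates; infer_instance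

-- ===== CLAIM (what is proved, stated in full; the proofs are below) =====
def Claim_equal_numDuplicates : Prop := ∀ (name : List String) (price : List Int) (weight : List Int), Dom_numDuplicates name price weight → Pre_numDuplicates name price weight → Spec_numDuplicates name price weight (numDuplicates name price weight)

-- ===== LEMMAS AND PROOFS =====

-- A's index loop, with the product id built by g from the index, counts
-- (number of indices) minus (growth of the seen-key set of the dict).
theorem loopA_count (g : Int → String × Int × Int) (l : List Int)
    : ∀ (d : PySem.Dict (String × Int × Int) Int) (c : Int), d.keys.Nodup →
      (l.foldl
        (fun (st : PySem.Dict (String × Int × Int) Int × Int) i =>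
          if st.1.contains (g i) then (st.1, st.2 + 1) else (st.1.insert (g i) 1, st.2))
        (d, c)).2
      = c + (l.length : Int)
          - ((((l.map g).foldl PySem.Set.add d.keys).length : Int) - (d.keys.length : Int)) := by
  induction l with
  | nil => intro d c _; simp
  | cons x xs ih =>
    intro d c hnd
    simp only [List.foldl_cons, List.map_cons]
    by_cases hc : d.contains (g x) = true
    · have hmem : g x ∈ d.keys := (PySem.Dict.contains_iff_mem_keys d (g x)).mp hc
      have hadd : PySem.Set.add d.keys (g x) = d.keys := by
        simp [PySem.Set.add, PySem.Set.contains, hmem]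
      rw [if_pos hc, ih d (c + 1) hnd, hadd]
      simp only [List.length_cons]; push_cast; ring
    · have hmem : g x ∉ d.keys := fun h => hc ((PySem.Dict.contains_iff_mem_keys d (g x)).mpr h)
      have hadd : PySem.Set.add d.keys (g x) = d.keys ++ [g x] := by
        simp [PySem.Set.add, PySem.Set.contains, hmem]
      have hkeys : (d.insert (g x) 1).keys = d.keys ++ [g x] :=
        PySem.Dict.keys_insert_of_not_contains d 1 (by simpa using hc)
      have hnd' : (d.insert (g x) 1).keys.Nodup := PySem.Dict.nodup_keys_insert d (g x) 1 hnd
      rw [if_neg hc, ih (d.insert (g x) 1) c hnd', hkeys, hadd]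
      simp only [List.length_cons, List.length_append, List.length_nil]; push_cast; ring

-- the sort key is injective
theorem pyTupleKey_inj (a b : String × Int × Int) (h : pyTupleKey a = pyTupleKey b) : a = b := by
  unfold pyTupleKey at h
  have h' := congrArg ofLex h
  simp only [ofLex_toLex, Prod.mk.injEq] at h'
  obtain ⟨h1, h2⟩ := h'
  have h2' := congrArg ofLex h2
  simp only [ofLex_toLex, Prod.mk.injEq] at h2'
  obtain ⟨ha, hb⟩ := h2'
  have hs : a.1 = b.1 := String.toList_inj.mp h1
  exact Prod.ext hs (Prod.ext ha hb)

-- in a list sorted under an injective key, the number of adjacent equal pairs is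
-- length minus the number of distinct elements
theorem adj_count_sorted {α κ : Type} [DecidableEq α] [LinearOrder κ] (key : α → κ)
    (hinj : ∀ a b, key a = key b → a = b)
    : ∀ (s : List α), s.Pairwise (fun a b => key a ≤ key b) →
      (s.zip s.tail).countP (fun p => decide (p.1 = p.2)) = s.length - s.dedup.length := by
  intro s
  induction s with
  | nil => intro _; simp
  | cons x t ih =>
    intro hp
    rw [List.pairwise_cons] at hp
    obtain ⟨h1, h2⟩ := hp
    cases t with
    | nil => simp
    | cons y t' =>
      have hle : (List.dedup (y :: t')).length ≤ (y :: t').length :=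
        (List.dedup_sublist (y :: t')).length_le
      have ih' := ih h2
      by_cases hxy : x = y
      · subst hxy
        have hmem : x ∈ x :: t' := by simp
        rw [List.dedup_cons_of_mem hmem]
        simp only [List.tail_cons, List.zip_cons_cons, List.countP_cons, decide_eq_true_eq,
          if_true]
        simp only [List.tail_cons] at ih'
        rw [ih']
        simp only [List.length_cons] at ih' hle ⊢
        omega
      · have hxmem : x ∉ y :: t' := by
          intro hmem
          rcases List.mem_cons.mp hmem with h | h
          · exact hxy h
          · have hyx : key y ≤ key x := (List.pairwise_cons.mp h2).1 x h
            have hxy' : key x ≤ key y := h1 y (by simp)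
            exact hxy (hinj x y (le_antisymm hxy' hyx))
        rw [List.dedup_cons_of_notMem hxmem]
        simp only [List.tail_cons, List.zip_cons_cons, List.countP_cons]
        simp only [List.tail_cons] at ih'
        simp only [decide_eq_true_eq, if_neg hxy]
        rw [ih']
        simp only [List.length_cons] at ih' hle ⊢
        omega

-- B equals (number of ids) minus (number of distinct ids)
theorem altB_closed (name : List String) (price : List Int) (weight : List Int) :
    numDuplicates_alt name price weight
      = (((PySem.List.pyRange 0 (name.length : Int) 1).map
            (fun i => (PySem.List.pyGetD name i "", PySem.List.pyGetD price i 0, PySem.List.pyGetD weight i 0))).length : Int)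
        - ((PySem.Set.ofList ((PySem.List.pyRange 0 (name.length : Int) 1).map
            (fun i => (PySem.List.pyGetD name i "", PySem.List.pyGetD price i 0, PySem.List.pyGetD weight i 0)))).length : Int) := by
  simp only [numDuplicates_alt]
  set ids := (PySem.List.pyRange 0 (name.length : Int) 1).map
    (fun i => (PySem.List.pyGetD name i "", PySem.List.pyGetD price i 0, PySem.List.pyGetD weight i 0)) with hids
  set s := PySem.List.sorted ids pyTupleKey with hs
  rw [PySem.List.slice_from_one]
  rw [PySem.List.foldl_if_add_one]
  have hbeq : (fun (p : (String × Int × Int) × (String × Int × Int)) => p.1 == p.2)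
      = fun p => decide (p.1 = p.2) := by
    funext p; exact Bool.beq_eq_decide_eq p.1 p.2
  rw [hbeq, adj_count_sorted pyTupleKey pyTupleKey_inj s (PySem.List.sorted_pairwise ids pyTupleKey)]
  have hperm : s.Perm ids := PySem.List.sorted_perm ids pyTupleKey false
  have hlen : s.length = ids.length := hperm.length_eq
  have hded : s.dedup.length = (PySem.Set.ofList ids).length := by
    have h1 : s.dedup.Perm ids.dedup := hperm.dedup
    have h2 : ids.dedup.Perm (PySem.Set.ofList ids) := by
      rw [List.perm_ext_iff_of_nodup (List.nodup_dedup ids) (PySem.Set.nodup_ofList ids)]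
      intro a
      rw [List.mem_dedup, PySem.Set.mem_ofList]
    exact (h1.trans h2).length_eq
  have hle : s.dedup.length ≤ s.length := (List.dedup_sublist s).length_le
  rw [hlen] at hle ⊢
  rw [hded] at hle ⊢
  omega

-- ===== VERDICT (by name: the statement is the Claim_ definition above) =====
theorem numDuplicates_spec : Claim_equal_numDuplicates := by
  intro name price weight _ _
  unfold Spec_numDuplicates numDuplicates
  rw [altB_closed]
  rw [loopA_count
    (fun i => (PySem.List.pyGetD name i "", PySem.List.pyGetD price i 0, PySem.List.pyGetD weight i 0))
    (PySem.List.pyRange 0 (name.length : Int) 1)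
    PySem.Dict.empty 0 (by simp [PySem.Dict.empty, PySem.Dict.keys])]
  simp [PySem.Set.ofList_eq_foldl, PySem.Dict.empty, PySem.Dict.keys, List.length_map]
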